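-- pv_equiv track=rewrite | github.com/sdhers/RAINSTORM | backend/seize_labels/multiplot/plot_roi_activity.py | _count_alternations_and_entries
-- ===== SOURCE A (Python) =====
-- from typing import List, Tuple, Callable
--
-- def _count_alternations_and_entries(area_sequence: List[str]) -> Tuple[int, int]:
--     """
--     Counts alternations and total entries from a sequence of visited areas.
--     An alternation is a sequence of three different, consecutive area entries (e.g., A -> B -> C).
--     """
--     # Exclude 'other' from the sequence as it's not a target ROI.
--     area_sequence = [area for area in area_sequence if area != "other"]
--
--     # Filter out consecutive duplicates to get a sequence of area *entrances*.
--     entry_sequence = [area_sequence[i] for i in range(len(area_sequence)) if i == 0 or area_sequence[i] != area_sequence[i - 1]]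
--
--     total_entries = len(entry_sequence)
--     alternations = 0
--
--     # An alternation requires at least 3 entries to be possible.
--     if total_entries < 3:
--         return 0, total_entries
--
--     # Iterate through triplets of entries to find alternations (e.g., A, B, C where A!=B, B!=C, A!=C)
--     for i in range(len(entry_sequence) - 2):
--         # Check if the three consecutive entries are all unique
--         if len(set(entry_sequence[i:i+3])) == 3:
--             alternations += 1
--
--     return alternations, total_entries
-- ===== SOURCE B (Python) =====
-- def _count_alternations_and_entries(area_sequence):
--     """One fused pass: skip 'other' and consecutive repeats inline, keep the
--     last two accepted entrances; count an alternation whenever the oldest of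
--     the current triple differs from the newest (adjacent ones already differ)."""
--     alternations = 0
--     total_entries = 0
--     prev2 = prev1 = None
--     for area in area_sequence:
--         if area == "other" or area == prev1:
--             continue
--         total_entries += 1
--         if prev2 is not None and prev2 != area:
--             alternations += 1
--         prev2, prev1 = prev1, area
--     return alternations, total_entries
-- ===== Notes on version B (the rewrite author's own statement) =====
-- stated objective: faster
-- what changed: Replaced A's three passes (filter list, index-based consecutive-dedup comprehension, triplet-set scan with slicing) by one fused loop that keeps only the last two accepted entrances and counts an alternation when the oldest of the triple differs from the newest; no intermediate lists or set objects are built.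
import Mathlib
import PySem

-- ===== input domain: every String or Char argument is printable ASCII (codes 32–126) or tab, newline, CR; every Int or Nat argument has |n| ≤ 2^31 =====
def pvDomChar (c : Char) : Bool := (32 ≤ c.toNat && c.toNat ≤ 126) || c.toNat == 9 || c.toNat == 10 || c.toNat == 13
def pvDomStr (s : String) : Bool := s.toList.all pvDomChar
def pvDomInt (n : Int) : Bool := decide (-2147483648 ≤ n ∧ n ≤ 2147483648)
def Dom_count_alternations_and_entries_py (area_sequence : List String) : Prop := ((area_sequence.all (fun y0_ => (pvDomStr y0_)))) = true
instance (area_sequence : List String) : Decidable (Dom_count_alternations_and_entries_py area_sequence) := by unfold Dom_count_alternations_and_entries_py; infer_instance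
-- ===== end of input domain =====

-- B fuses A's filter pass, dedup pass and triplet scan into one loop over the input (same O(n) cost, no intermediate lists); return values proved equal on all inputs.

-- ===== PORT A =====
-- Literal port of A: filter out "other", build the entrance list by the index
-- comprehension (keep index 0 and indices whose element differs from its
-- predecessor), early return for fewer than 3 entries, then scan triplets
-- entry_sequence[i:i+3] and count those whose set has 3 elements.
def count_alternations_and_entries_py (area_sequence : List String) : Int × Int :=
  let seq := area_sequence.filter (fun area => area ≠ "other")
  let entry_sequence := (List.range seq.length).filterMap (fun i =>
      if i = 0 ∨ seq.getD i "" ≠ seq.getD (i - 1) "" then some (seq.getD i "") else none)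
  let total_entries : Int := entry_sequence.length
  if total_entries < 3 then (0, total_entries)
  else
    let alternations : Int := (List.range (entry_sequence.length - 2)).foldl (fun (acc : Int) (i : Nat) =>
        if (PySem.Set.ofList (PySem.List.slice entry_sequence (some (i : Int)) (some ((i : Int) + 3)))).length = 3
        then acc + 1 else acc) 0
    (alternations, total_entries)

-- ===== PORT B =====
-- Literal port of B: one fold carrying (alternations, total_entries, prev2, prev1).
def count_alternations_and_entries_py_alt (area_sequence : List String) : Int × Int :=
  let s := area_sequence.foldl
    (fun (st : Int × Int × Option String × Option String) area =>
      let (alternations, total_entries, prev2, prev1) := st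
      if area = "other" ∨ some area = prev1 then st
      else (alternations + (if prev2.isSome ∧ prev2 ≠ some area then 1 else 0),
            total_entries + 1, prev1, some area))
    (0, 0, none, none)
  (s.1, s.2.1)

-- ===== PRECONDITION & SPEC =====
def Spec_count_alternations_and_entries_py (area_sequence : List String) (out : Int × Int) : Prop := out = count_alternations_and_entries_py_alt area_sequence
instance (area_sequence : List String) (out : Int × Int) : Decidable (Spec_count_alternations_and_entries_py area_sequence out) := by unfold Spec_count_alternations_and_entries_py; infer_instance

-- ===== CLAIM (what is proved, stated in full; the proofs are below) =====
def Claim_equal_count_alternations_and_entries_py : Prop := ∀ (area_sequence : List String), Dom_count_alternations_and_entries_py area_sequence → Spec_count_alternations_and_entries_py area_sequence (count_alternations_and_entries_py area_sequence)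

-- ===== LEMMAS AND PROOFS =====

-- Consecutive-dedup of a list relative to the previously accepted element.
def pvDed (p1 : Option String) : List String → List String
  | [] => []
  | a :: r => if some a = p1 then pvDed p1 r else a :: pvDed (some a) r

-- Alternation count of the dedup'd entrance list relative to the last two accepted entrances.
def pvCnt (p2 p1 : Option String) : List String → Int
  | [] => 0
  | a :: r => (if p2.isSome ∧ p2 ≠ some a then 1 else 0) + pvCnt p1 (some a) r

-- A's triplet count, written recursively.
def pvTriple : List String → Int
  | a :: b :: c :: r => (if a ≠ c then 1 else 0) + pvTriple (b :: c :: r)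
  | _ => 0

-- The entrance-list comprehension of port A (over the already-filtered list).
def pvEntry (seq : List String) : List String :=
  (List.range seq.length).filterMap (fun i =>
      if i = 0 ∨ seq.getD i "" ≠ seq.getD (i - 1) "" then some (seq.getD i "") else none)

-- A's inner triplet fold.
def pvACount (e : List String) : Int :=
  (List.range (e.length - 2)).foldl (fun (acc : Int) (i : Nat) =>
      if (PySem.Set.ofList (PySem.List.slice e (some (i : Int)) (some ((i : Int) + 3)))).length = 3
      then acc + 1 else acc) 0

def pvStep (st : Int × Int × Option String × Option String) (area : String) :
    Int × Int × Option String × Option String :=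
  let (alternations, total_entries, prev2, prev1) := st
  if area = "other" ∨ some area = prev1 then st
  else (alternations + (if prev2.isSome ∧ prev2 ≠ some area then 1 else 0),
        total_entries + 1, prev1, some area)

lemma pvAlt_eq_fold (xs : List String) :
    count_alternations_and_entries_py_alt xs =
      ((xs.foldl pvStep (0, 0, none, none)).1, (xs.foldl pvStep (0, 0, none, none)).2.1) := by
  rfl

-- skipping "other" elements: fold over xs equals fold over the filtered list
lemma pvFold_filter (xs : List String) (st : Int × Int × Option String × Option String) :
    xs.foldl pvStep st = (xs.filter (fun a => a ≠ "other")).foldl pvStep st := by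
  induction xs generalizing st with
  | nil => rfl
  | cons a r ih =>
    by_cases h : a = "other"
    · subst h
      simp [pvStep, List.foldl_cons, ih]
    · simp [h, List.foldl_cons, ih]

-- main B invariant over an "other"-free list
lemma pvFold_inv (ys : List String) (h : "other" ∉ ys) (alt tot : Int)
    (p2 p1 : Option String) :
    (ys.foldl pvStep (alt, tot, p2, p1)).1 = alt + pvCnt p2 p1 (pvDed p1 ys) ∧
    (ys.foldl pvStep (alt, tot, p2, p1)).2.1 = tot + (pvDed p1 ys).length := by
  induction ys generalizing alt tot p2 p1 with
  | nil => simp [pvDed, pvCnt]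
  | cons a r ih =>
    have ha : a ≠ "other" := fun hh => h (hh ▸ List.mem_cons_self)
    have hr : "other" ∉ r := fun hh => h (List.mem_cons_of_mem _ hh)
    by_cases hp : some a = p1
    · simp only [List.foldl_cons, pvStep, if_pos (Or.inr hp), pvDed, if_pos hp]
      exact ih hr alt tot p2 p1
    · have : ¬ (a = "other" ∨ some a = p1) := by tauto
      simp only [List.foldl_cons, pvStep, if_neg this, pvDed, if_neg hp]
      obtain ⟨h1, h2⟩ := ih hr (alt + (if p2.isSome ∧ p2 ≠ some a then 1 else 0)) (tot + 1) p1 (some a)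
      refine ⟨?_, ?_⟩
      · rw [h1]; simp [pvCnt]; ring
      · rw [h2]; simp; ring

-- pvCnt from the empty state is the triplet count
lemma pvCnt_pair (a b : String) (l : List String) :
    pvCnt (some a) (some b) l = pvTriple (a :: b :: l) := by
  induction l generalizing a b with
  | nil => simp [pvCnt, pvTriple]
  | cons c r ih => simp [pvCnt, pvTriple, ih]

lemma pvCnt_none (e : List String) : pvCnt none none e = pvTriple e := by
  match e with
  | [] => simp [pvCnt, pvTriple]
  | [a] => simp [pvCnt, pvTriple]
  | a :: b :: r => simp [pvCnt, pvCnt_pair]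

-- pvDed produces a list whose adjacent elements differ, and whose head differs from p1
lemma pvDed_chain (ys : List String) (p1 : Option String) :
    (pvDed p1 ys).IsChain (· ≠ ·) ∧ ∀ h ∈ (pvDed p1 ys).head?, some h ≠ p1 := by
  induction ys generalizing p1 with
  | nil => exact ⟨List.IsChain.nil, by simp [pvDed]⟩
  | cons a r ih =>
    by_cases hp : some a = p1
    · simpa [pvDed, hp] using ih p1
    · obtain ⟨hc, hh⟩ := ih (some a)
      refine ⟨?_, ?_⟩
      · simp only [pvDed, if_neg hp]
        refine List.IsChain.cons hc ?_
        intro y hy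
        have := hh y hy
        intro hay
        exact this (by simp [hay])
      · intro h hmem
        simp [pvDed, if_neg hp] at hmem
        subst hmem
        exact hp

-- the entrance comprehension equals pvDed from the empty state
lemma pvEntry_g (p : String) (xs : List String) :
    (List.range xs.length).filterMap (fun i =>
        if (p :: xs).getD (i + 1) "" ≠ (p :: xs).getD i "" then some ((p :: xs).getD (i + 1) "") else none)
      = pvDed (some p) xs := by
  induction xs generalizing p with
  | nil => simp [pvDed]
  | cons b ys ih =>
    rw [show (b :: ys).length = ys.length + 1 from rfl, List.range_succ_eq_map,
        List.filterMap_cons, List.filterMap_map]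
    by_cases hb : b = p
    · subst hb
      simp only [pvDed]
      rw [← ih b]
      simp [Function.comp]
    · simp only [pvDed, if_neg (fun hh : some b = some p => hb (Option.some.inj hh))]
      rw [← ih b]
      simp [Function.comp, hb]

lemma pvEntry_eq_ded (seq : List String) : pvEntry seq = pvDed none seq := by
  cases seq with
  | nil => rfl
  | cons a r =>
    unfold pvEntry
    rw [show pvDed none (a :: r) = a :: pvDed (some a) r from by simp [pvDed],
        show (a :: r).length = r.length + 1 from rfl, List.range_succ_eq_map,
        List.filterMap_cons, List.filterMap_map, ← pvEntry_g a r]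
    simp [Function.comp]

-- set-of-three size: with adjacent elements distinct, the test is first ≠ third
lemma pvSet3 (a b c : String) (hab : a ≠ b) (hbc : b ≠ c) :
    ((PySem.Set.ofList [a, b, c]).length = 3) ↔ a ≠ c := by
  have hba := Ne.symm hab
  have hcb := Ne.symm hbc
  by_cases hac : a = c
  · subst hac
    simp [PySem.Set.ofList, PySem.Set.add, PySem.Set.contains, PySem.Set.empty, hba, hcb]
  · simp [PySem.Set.ofList, PySem.Set.add, PySem.Set.contains, PySem.Set.empty, hba, hcb, hac,
      Ne.symm hac]

-- A's fold is an accumulator shift of a pure count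
lemma pvACount_fold_shift (l : List Nat) (P : Nat → Prop) [DecidablePred P] (acc : Int) :
    l.foldl (fun acc i => if P i then acc + 1 else acc) acc = acc + l.foldl (fun acc i => if P i then acc + 1 else acc) 0 := by
  induction l generalizing acc with
  | nil => simp
  | cons x r ih =>
    simp only [List.foldl_cons]
    rw [ih, ih (if P x then (0:Int) + 1 else 0)]
    split_ifs <;> ring

-- A's triplet fold equals pvTriple on a chain-distinct list
lemma pvACount_eq_triple (e : List String) (hc : e.IsChain (· ≠ ·)) :
    pvACount e = pvTriple e := by
  match e, hc with
  | [], _ => rfl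
  | [a], _ => rfl
  | [a, b], _ => rfl
  | a :: b :: c :: r, hc =>
    have hab : a ≠ b := (List.isChain_cons_cons.1 hc).1
    have hc' : (b :: c :: r).IsChain (· ≠ ·) := (List.isChain_cons_cons.1 hc).2
    have hbc : b ≠ c := (List.isChain_cons_cons.1 hc').1
    have ih := pvACount_eq_triple (b :: c :: r) hc'
    unfold pvACount at ih ⊢
    rw [show (a :: b :: c :: r).length - 2 = ((b :: c :: r).length - 2) + 1 from by simp,
        List.range_succ_eq_map, List.foldl_cons, List.foldl_map]
    have h0 : PySem.List.slice (a :: b :: c :: r) (some ((0:Nat) : Int)) (some (((0:Nat) : Int) + 3)) = [a, b, c] := by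
      rw [show (((0:Nat):Int) + 3) = (((0:Nat):Int) + ((3:Nat):Int)) from by norm_num,
          PySem.List.slice_natCast_add]
      rfl
    have hshift : ∀ i : Nat,
        PySem.List.slice (a :: b :: c :: r) (some ((i.succ : Nat) : Int)) (some (((i.succ : Nat) : Int) + 3)) =
        PySem.List.slice (b :: c :: r) (some ((i : Nat) : Int)) (some (((i : Nat) : Int) + 3)) := by
      intro i
      have h1 : ((i.succ : Nat) : Int) + 3 = ((i.succ : Nat) : Int) + ((3 : Nat) : Int) := by push_cast; ring
      have h2 : ((i : Nat) : Int) + 3 = ((i : Nat) : Int) + ((3 : Nat) : Int) := by push_cast; ring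
      rw [h1, h2, PySem.List.slice_natCast_add, PySem.List.slice_natCast_add, List.drop_succ_cons]
    rw [pvACount_fold_shift (P := fun i : Nat =>
        (PySem.Set.ofList (PySem.List.slice (a :: b :: c :: r) (some ((i.succ : Nat) : Int)) (some (((i.succ : Nat) : Int) + 3)))).length = 3)]
    simp only [hshift]
    rw [ih, h0]
    have hiff := pvSet3 a b c hab hbc
    by_cases hac : a = c
    · have hfalse : ¬ (PySem.Set.ofList [a, b, c]).length = 3 := fun h => (hiff.1 h) hac
      simp only [pvTriple]
      rw [if_neg hfalse, if_neg (fun h : a ≠ c => h hac)]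
    · simp only [pvTriple]
      rw [if_pos (hiff.2 hac), if_pos hac]
      ring
termination_by e.length

-- A's inner fold is 0 when there are fewer than 3 entries
lemma pvACount_small (e : List String) (h : e.length < 3) : pvACount e = 0 := by
  unfold pvACount
  rw [show e.length - 2 = 0 from by omega]
  rfl

-- final characterisation of port A: the early return collapses into the fold
lemma pvA_eq (xs : List String) :
    count_alternations_and_entries_py xs =
      (pvACount (pvEntry (xs.filter (fun a => a ≠ "other"))),
       ((pvEntry (xs.filter (fun a => a ≠ "other"))).length : Int)) := by
  show (if ((pvEntry (xs.filter (fun a => a ≠ "other"))).length : Int) < 3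
        then ((0 : Int), ((pvEntry (xs.filter (fun a => a ≠ "other"))).length : Int))
        else (pvACount (pvEntry (xs.filter (fun a => a ≠ "other"))),
              ((pvEntry (xs.filter (fun a => a ≠ "other"))).length : Int))) = _
  split_ifs with h
  · rw [pvACount_small _ (by omega)]
  · rfl

-- ===== VERDICT (by name: the statement is the Claim_ definition above) =====
theorem count_alternations_and_entries_py_spec : Claim_equal_count_alternations_and_entries_py := by
  intro xs _
  unfold Spec_count_alternations_and_entries_py
  rw [pvA_eq, pvAlt_eq_fold, pvFold_filter]
  have hno : "other" ∉ xs.filter (fun a => a ≠ "other") := by simp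
  obtain ⟨h1, h2⟩ := pvFold_inv (xs.filter (fun a => a ≠ "other")) hno 0 0 none none
  rw [h1, h2, pvEntry_eq_ded, pvACount_eq_triple _ (pvDed_chain (xs.filter (fun a => a ≠ "other")) none).1,
      ← pvCnt_none]
  simp
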